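-- pv_equiv track=rewrite | github.com/ronme06928-PowerfulFox/gemtrpg-bot | manager/summons/loader.py | _merge_param_list
-- ===== SOURCE A (Python) =====
-- def _merge_param_list(base_params, override_params):
--     merged = []
--     seen = set()
--     for src in [base_params, override_params]:
--         if not isinstance(src, list):
--             continue
--         for row in src:
--             if not isinstance(row, dict):
--                 continue
--             label = str(row.get("label", "")).strip()
--             if not label:
--                 continue
--             if label in seen:
--                 for i, existing in enumerate(merged):
--                     if existing.get("label") == label:
--                         merged[i] = {"label": label, "value": row.get("value", "0")}
--                         break
--                 continue
--             merged.append({"label": label, "value": row.get("value", "0")})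
--             seen.add(label)
--     return merged
-- ===== SOURCE B (Python) =====
-- def _merge_param_list(base_params, override_params):
--     # Stage 1: flatten both sources into a list of valid (label, value) pairs.
--     rows = []
--     for src in (base_params, override_params):
--         if isinstance(src, list):
--             for row in src:
--                 if isinstance(row, dict):
--                     label = str(row.get("label", "")).strip()
--                     if label:
--                         rows.append((label, row.get("value", "0")))
--     # Stage 2: backward pass — the first value seen in reverse is the final (last) value.
--     final = {}
--     for label, value in reversed(rows):
--         if label not in final:
--             final[label] = value
--     # Stage 3: forward pass — emit each label at its first occurrence with its final value.
--     out = []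
--     emitted = set()
--     for label, _ in rows:
--         if label not in emitted:
--             emitted.add(label)
--             out.append({"label": label, "value": final[label]})
--     return out
-- ===== Notes on version B (the rewrite author's own statement) =====
-- stated objective: alternative
-- what changed: Replaces A's single online pass with in-place rescan-and-replace by a three-stage pipeline: flatten both sources to valid (label,value) pairs, a backward pass that fixes each label's final value (first seen in reverse = last occurrence), and a forward dedup pass that emits labels at first occurrence; no in-place updates of already-emitted rows.
import Mathlib
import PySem

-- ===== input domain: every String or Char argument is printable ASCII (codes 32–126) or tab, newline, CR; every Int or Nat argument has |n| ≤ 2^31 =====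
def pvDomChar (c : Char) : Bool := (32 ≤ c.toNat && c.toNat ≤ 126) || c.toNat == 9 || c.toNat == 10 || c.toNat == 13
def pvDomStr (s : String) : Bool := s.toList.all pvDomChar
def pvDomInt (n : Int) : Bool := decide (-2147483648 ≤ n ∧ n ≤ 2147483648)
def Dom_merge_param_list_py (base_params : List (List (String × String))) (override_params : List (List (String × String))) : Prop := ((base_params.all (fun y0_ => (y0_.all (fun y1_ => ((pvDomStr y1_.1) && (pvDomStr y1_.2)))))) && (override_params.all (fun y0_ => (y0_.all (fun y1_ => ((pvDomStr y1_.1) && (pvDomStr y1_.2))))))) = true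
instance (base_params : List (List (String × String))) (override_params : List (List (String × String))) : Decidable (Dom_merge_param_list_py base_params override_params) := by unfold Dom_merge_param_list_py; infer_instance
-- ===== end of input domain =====

-- B replaces A's single online pass (merged list + seen set + inner rescan-and-replace on
-- duplicates) by a three-stage pipeline: flatten to valid (label,value) pairs, a backward
-- pass fixing each label's final value, a forward dedup pass emitting first occurrences;
-- objective: alternative.

-- ===== PORT A =====
-- row.get(k, dflt): first-match association lookup (a Python dict has unique keys)
def pvRowGet (row : List (String × String)) (k dflt : String) : String :=
  match row.find? (fun p => p.1 == k) with
  | some p => p.2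
  | none => dflt

-- the inner 'for i, existing in enumerate(merged): if existing.get("label") == label: merged[i] = …; break'
-- (existing.get("label") with no default is None when absent; None == label is False for the nonempty label)
def pvReplaceFirst (label value : String) : List (List (String × String)) → List (List (String × String))
  | [] => []
  | existing :: rest =>
      if existing.find? (fun p => p.1 == "label") = some ("label", label) then
        [("label", label), ("value", value)] :: rest
      else existing :: pvReplaceFirst label value rest

-- the body of 'for row in src' over the state (merged, seen); the isinstance guards are
-- guaranteed true by the types and are dropped
def pvStepA (st : List (List (String × String)) × PySem.Set String) (row : List (String × String)) :
    List (List (String × String)) × PySem.Set String :=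
  let label := PySem.Str.strip (pvRowGet row "label" "")
  if label = "" then st
  else if PySem.Set.contains st.2 label then
    (pvReplaceFirst label (pvRowGet row "value" "0") st.1, st.2)
  else
    (st.1 ++ [[("label", label), ("value", pvRowGet row "value" "0")]], PySem.Set.add st.2 label)

def merge_param_list_py (base_params : List (List (String × String))) (override_params : List (List (String × String))) : List (List (String × String)) :=
  (([base_params, override_params].foldl (fun st src => src.foldl pvStepA st)
      (([] : List (List (String × String))), (PySem.Set.empty : PySem.Set String)))).1

-- ===== PORT B =====
-- stage 1 body: 'if label: rows.append((label, row.get("value", "0")))'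
def pvCollectStep (acc : List (String × String)) (row : List (String × String)) : List (String × String) :=
  let label := PySem.Str.strip (pvRowGet row "label" "")
  if label = "" then acc else acc ++ [(label, pvRowGet row "value" "0")]

-- stage 2 body: 'if label not in final: final[label] = value'
def pvFinalStep (d : PySem.Dict String String) (p : String × String) : PySem.Dict String String :=
  if d.contains p.1 then d else d.insert p.1 p.2

-- stage 3 body: 'if label not in emitted: emitted.add(label); out.append(...)'
-- final[label] always succeeds (every label of rows is a key of final); ported as getD with
-- an arbitrary default "0", exact on every reachable lookup
def pvEmitStep (final : PySem.Dict String String)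
    (st : List (List (String × String)) × PySem.Set String) (p : String × String) :
    List (List (String × String)) × PySem.Set String :=
  if PySem.Set.contains st.2 p.1 then st
  else (st.1 ++ [[("label", p.1), ("value", final.getD p.1 "0")]], PySem.Set.add st.2 p.1)

def merge_param_list_py_alt (base_params : List (List (String × String))) (override_params : List (List (String × String))) : List (List (String × String)) :=
  let rows := [base_params, override_params].foldl (fun acc src => src.foldl pvCollectStep acc) []
  let final := rows.reverse.foldl pvFinalStep PySem.Dict.empty
  (rows.foldl (pvEmitStep final) (([] : List (List (String × String))), (PySem.Set.empty : PySem.Set String))).1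

-- ===== PRECONDITION & SPEC =====
def Spec_merge_param_list_py (base_params : List (List (String × String))) (override_params : List (List (String × String))) (out : List (List (String × String))) : Prop := out = merge_param_list_py_alt base_params override_params
instance (base_params : List (List (String × String))) (override_params : List (List (String × String))) (out : List (List (String × String))) : Decidable (Spec_merge_param_list_py base_params override_params out) := by unfold Spec_merge_param_list_py; infer_instance

-- ===== CLAIM (what is proved, stated in full; the proofs are below) =====
def Claim_equal_merge_param_list_py : Prop := ∀ (base_params : List (List (String × String))) (override_params : List (List (String × String))), Dom_merge_param_list_py base_params override_params → Spec_merge_param_list_py base_params override_params (merge_param_list_py base_params override_params)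

-- ===== LEMMAS AND PROOFS =====

-- the valid (label, value) pair a row contributes, if any
def pvValidOf (row : List (String × String)) : Option (String × String) :=
  let label := PySem.Str.strip (pvRowGet row "label" "")
  if label = "" then none else some (label, pvRowGet row "value" "0")

-- A's loop body on an already-validated pair
def pvPairA (st : List (List (String × String)) × PySem.Set String) (q : String × String) :
    List (List (String × String)) × PySem.Set String :=
  if PySem.Set.contains st.2 q.1 then (pvReplaceFirst q.1 q.2 st.1, st.2)
  else (st.1 ++ [[("label", q.1), ("value", q.2)]], PySem.Set.add st.2 q.1)

-- render an association list as the list of rows A/B store for it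
def pvRender (items : List (String × String)) : List (List (String × String)) :=
  items.map (fun p => [("label", p.1), ("value", p.2)])

-- value of the LAST occurrence of l in rows ("0" if absent; that case is never emitted)
def pvLastVal (rows : List (String × String)) (l : String) : String :=
  (((rows.reverse.find? (fun q => q.1 == l)).map (·.2))).getD "0"

def pvItemsOf (rows : List (String × String)) : List (String × String) :=
  (PySem.Set.ofList (rows.map (·.1))).map (fun l => (l, pvLastVal rows l))

lemma pvCollect_eq (src : List (List (String × String))) (acc : List (String × String)) :
    src.foldl pvCollectStep acc = acc ++ src.filterMap pvValidOf := by
  induction src generalizing acc with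
  | nil => simp
  | cons row rest ih =>
      rw [List.foldl_cons, List.filterMap_cons]
      by_cases h : PySem.Str.strip (pvRowGet row "label" "") = ""
      · rw [show pvCollectStep acc row = acc from by simp [pvCollectStep, h],
            show pvValidOf row = none from by simp [pvValidOf, h], ih]
      · rw [show pvCollectStep acc row
              = acc ++ [(PySem.Str.strip (pvRowGet row "label" ""), pvRowGet row "value" "0")] from
              by simp [pvCollectStep, h],
            show pvValidOf row
              = some (PySem.Str.strip (pvRowGet row "label" ""), pvRowGet row "value" "0") from
              by simp [pvValidOf, h], ih]
        simp

lemma pvStepA_eq (st : List (List (String × String)) × PySem.Set String) (row : List (String × String)) :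
    pvStepA st row = match pvValidOf row with | some q => pvPairA st q | none => st := by
  simp only [pvStepA, pvValidOf, pvPairA]
  split <;> simp

lemma pvFoldA_eq (src : List (List (String × String))) (st : List (List (String × String)) × PySem.Set String) :
    src.foldl pvStepA st = (src.filterMap pvValidOf).foldl pvPairA st := by
  rw [List.foldl_filterMap]
  apply PySem.List.foldl_congr_mem
  intro acc x _
  cases h : pvValidOf x <;> simp [pvStepA_eq, h]

lemma pvLastVal_append (p : List (String × String)) (l v l' : String) :
    pvLastVal (p ++ [(l, v)]) l' = if l' = l then v else pvLastVal p l' := by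
  by_cases h : l' = l
  · subst h; simp [pvLastVal]
  · have hb : (l == l') = false := by simp; exact fun e => h e.symm
    simp [pvLastVal, hb, h]

lemma pvOfList_append (xs : List String) (y : String) :
    PySem.Set.ofList (xs ++ [y]) = PySem.Set.add (PySem.Set.ofList xs) y := by
  simp [PySem.Set.ofList_eq_foldl, List.foldl_append]

lemma pvReplaceFirst_render (label value : String) (l : List (String × String))
    (hnd : (l.map (·.1)).Nodup) (hmem : label ∈ l.map (·.1)) :
    pvReplaceFirst label value (pvRender l) =
      pvRender (l.map (fun p => if p.1 == label then (label, value) else p)) := by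
  induction l with
  | nil => simp at hmem
  | cons p rest ih =>
      simp only [List.map_cons, List.nodup_cons] at hnd
      by_cases hp : p.1 = label
      · have hnot : label ∉ rest.map (·.1) := hp ▸ hnd.1
        have hid : rest.map (fun q => if q.1 == label then (label, value) else q) = rest :=
          calc rest.map (fun q => if q.1 == label then (label, value) else q)
              = rest.map id := by
                apply List.map_congr_left
                intro q hq
                have : q.1 ≠ label := fun e => hnot (e ▸ List.mem_map_of_mem hq)
                simp [this]
            _ = rest := List.map_id rest
        have hmap : (p :: rest).map (fun q => if q.1 == label then (label, value) else q)
            = (label, value) :: rest := by rw [List.map_cons, hid]; simp [hp]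
        rw [hmap]
        simp only [pvRender, List.map_cons, pvReplaceFirst, List.find?]
        rw [if_pos (by simp [hp])]
      · have hmem' : label ∈ rest.map (·.1) := by
          rcases List.mem_map.mp hmem with ⟨q, hq, hql⟩
          rcases List.mem_cons.mp hq with h | h
          · exact absurd (h ▸ hql) hp
          · exact List.mem_map.mpr ⟨q, h, hql⟩
        simp only [pvRender, List.map_cons, pvReplaceFirst, List.find?]
        rw [if_neg (by simp [hp])]
        have := ih hnd.2 hmem'
        simp only [pvRender] at this
        simp [hp, this]

-- A's fold over validated pairs computes the canonical merge
lemma pvFoldPairA (rows : List (String × String)) :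
    rows.foldl pvPairA (([] : List (List (String × String))), (PySem.Set.empty : PySem.Set String)) =
      (pvRender (pvItemsOf rows), PySem.Set.ofList (rows.map (·.1))) := by
  induction rows using List.reverseRecOn with
  | nil => rfl
  | append_singleton p x ih =>
      obtain ⟨l, v⟩ := x
      rw [List.foldl_append, ih, List.foldl_cons, List.foldl_nil]
      have hmapfst : (p ++ [(l, v)]).map (·.1) = p.map (·.1) ++ [l] := by simp
      have hnd : (PySem.Set.ofList (p.map (·.1))).Nodup := PySem.Set.nodup_ofList _
      by_cases hm : l ∈ PySem.Set.ofList (p.map (·.1))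
      · have hcb : PySem.Set.contains (PySem.Set.ofList (p.map (·.1))) l = true :=
          (PySem.Set.contains_iff _ _).mpr hm
        have hadd : PySem.Set.add (PySem.Set.ofList (p.map (·.1))) l = PySem.Set.ofList (p.map (·.1)) := by
          unfold PySem.Set.add; rw [hcb]; simp
        have hset : PySem.Set.ofList ((p ++ [(l, v)]).map (·.1)) = PySem.Set.ofList (p.map (·.1)) := by
          rw [hmapfst, pvOfList_append, hadd]
        simp only [pvPairA, hcb, if_pos]
        have hkeys : (pvItemsOf p).map (·.1) = PySem.Set.ofList (p.map (·.1)) := by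
          simp [pvItemsOf, List.map_map, Function.comp_def]
        have hmem : l ∈ (pvItemsOf p).map (·.1) := by rw [hkeys]; exact hm
        rw [pvReplaceFirst_render l v (pvItemsOf p) (by rw [hkeys]; exact hnd) hmem]
        have hitems : (pvItemsOf p).map (fun q => if q.1 == l then (l, v) else q)
            = pvItemsOf (p ++ [(l, v)]) := by
          simp only [pvItemsOf, hset, List.map_map]
          apply List.map_congr_left
          intro l' _
          by_cases h : l' = l <;> simp [h, pvLastVal_append]
        rw [hitems, hset]
      · have hcb : PySem.Set.contains (PySem.Set.ofList (p.map (·.1))) l = false := by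
          rcases h : PySem.Set.contains (PySem.Set.ofList (p.map (·.1))) l with _ | _
          · exact h
          · exact absurd ((PySem.Set.contains_iff _ _).mp h) hm
        have hadd : PySem.Set.add (PySem.Set.ofList (p.map (·.1))) l
            = PySem.Set.ofList (p.map (·.1)) ++ [l] := by
          unfold PySem.Set.add; rw [hcb]; simp
        have hset : PySem.Set.ofList ((p ++ [(l, v)]).map (·.1))
            = PySem.Set.ofList (p.map (·.1)) ++ [l] := by
          rw [hmapfst, pvOfList_append, hadd]
        simp only [pvPairA, hcb, Bool.false_eq_true, if_false]
        have hitems : pvItemsOf (p ++ [(l, v)]) = pvItemsOf p ++ [(l, v)] := by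
          simp only [pvItemsOf]
          rw [hmapfst, pvOfList_append, hadd, List.map_append]
          congr 1
          · apply List.map_congr_left
            intro l' hl'
            have : l' ≠ l := fun e => hm (e ▸ hl')
            simp [pvLastVal_append, this]
          · simp [pvLastVal_append]
        rw [hitems, hadd, hset]
        simp [pvRender]

-- the keep-first (backward) dict pass looks up the FIRST match of the scanned list
lemma pvFinal_get? (l : String) (rs : List (String × String)) (d : PySem.Dict String String) :
    (rs.foldl pvFinalStep d).get? l = (d.get? l).or ((rs.find? (fun q => q.1 == l)).map (·.2)) := by
  induction rs generalizing d with
  | nil => simp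
  | cons q rs ih =>
      obtain ⟨k, v⟩ := q
      simp only [List.foldl_cons, pvFinalStep]
      by_cases hk : k = l
      · subst hk
        by_cases hc : d.contains k = true
        · rw [if_pos hc, ih]
          have : (d.get? k).isSome := by
            rw [← PySem.Dict.contains_eq_isSome_get?]; exact hc
          obtain ⟨w, hw⟩ := Option.isSome_iff_exists.mp this
          simp [hw]
        · rw [if_neg hc, ih]
          have hnone : d.get? k = none := by
            rcases h : d.get? k with _ | w
            · rfl
            · exact absurd (by rw [PySem.Dict.contains_eq_isSome_get?, h]; rfl) hc
          simp [List.find?, hnone]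
      · have hb : (k == l) = false := by simp [hk]
        by_cases hc : d.contains k = true
        · rw [if_pos hc, ih]
          simp [List.find?, hb]
        · rw [if_neg hc, ih]
          simp [List.find?, hb, PySem.Dict.get?_insert_of_ne _ _ (fun e => hk e.symm)]

lemma pvFinal_getD (rows : List (String × String)) (l : String) :
    (rows.reverse.foldl pvFinalStep PySem.Dict.empty).getD l "0" = pvLastVal rows l := by
  rw [PySem.Dict.getD_eq_get?_getD, pvFinal_get?]
  simp [pvLastVal]

-- the forward dedup pass emits first occurrences with the precomputed final values
lemma pvFoldEmit (final : PySem.Dict String String) (rows : List (String × String)) :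
    rows.foldl (pvEmitStep final) (([] : List (List (String × String))), (PySem.Set.empty : PySem.Set String)) =
      ((PySem.Set.ofList (rows.map (·.1))).map (fun l => [("label", l), ("value", final.getD l "0")]),
        PySem.Set.ofList (rows.map (·.1))) := by
  induction rows using List.reverseRecOn with
  | nil => rfl
  | append_singleton p x ih =>
      obtain ⟨l, v⟩ := x
      rw [List.foldl_append, ih, List.foldl_cons, List.foldl_nil]
      have hmapfst : (p ++ [(l, v)]).map (·.1) = p.map (·.1) ++ [l] := by simp
      rw [hmapfst, pvOfList_append]
      simp only [pvEmitStep]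
      by_cases hm : l ∈ PySem.Set.ofList (p.map (·.1))
      · have hcb : PySem.Set.contains (PySem.Set.ofList (p.map (·.1))) l = true :=
          (PySem.Set.contains_iff _ _).mpr hm
        have hadd : PySem.Set.add (PySem.Set.ofList (p.map (·.1))) l = PySem.Set.ofList (p.map (·.1)) := by
          unfold PySem.Set.add; rw [hcb]; simp
        rw [if_pos hcb, hadd]
      · have hcb : PySem.Set.contains (PySem.Set.ofList (p.map (·.1))) l = false := by
          rcases h : PySem.Set.contains (PySem.Set.ofList (p.map (·.1))) l with _ | _
          · exact h
          · exact absurd ((PySem.Set.contains_iff _ _).mp h) hm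
        have hadd : PySem.Set.add (PySem.Set.ofList (p.map (·.1))) l
            = PySem.Set.ofList (p.map (·.1)) ++ [l] := by
          unfold PySem.Set.add; rw [hcb]; simp
        rw [if_neg (by rw [hcb]; simp), hadd]
        simp

-- ===== VERDICT (by name: the statement is the Claim_ definition above) =====
theorem merge_param_list_py_spec : Claim_equal_merge_param_list_py := by
  intro base_params override_params _
  unfold Spec_merge_param_list_py merge_param_list_py merge_param_list_py_alt
  simp only [List.foldl_cons, List.foldl_nil]
  rw [pvCollect_eq, pvCollect_eq, List.nil_append]
  set rows := base_params.filterMap pvValidOf ++ override_params.filterMap pvValidOf with hrows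
  rw [pvFoldA_eq, pvFoldA_eq, ← List.foldl_append, ← hrows, pvFoldPairA, pvFoldEmit]
  simp only [pvRender, pvItemsOf, List.map_map]
  apply List.map_congr_left
  intro l _
  simp only [Function.comp_def]
  rw [pvFinal_getD]
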